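-- pv_equiv track=rewrite | github.com/tjkuhns/explodable | scripts/backfill_manifestation_urls.py | _strip_trailing_parenthetical
-- ===== SOURCE A (Python) =====
-- def _strip_trailing_parenthetical(title: str) -> str:
--     """Remove trailing `(...)` from a title so S2 gets a clean query.
--
--     Source items often arrive as "Title (Author et al., Journal Year)".
--     The parenthetical is author/venue metadata, not part of the title —
--     leaving it in the query confuses S2's search ranking.
--     """
--     # Strip balanced trailing parens, possibly repeated
--     out = title.strip()
--     while out.endswith(")"):
--         depth = 0
--         cut_at = None
--         for i in range(len(out) - 1, -1, -1):
--             if out[i] == ")":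
--                 depth += 1
--             elif out[i] == "(":
--                 depth -= 1
--                 if depth == 0:
--                     cut_at = i
--                     break
--         if cut_at is None or cut_at == 0:
--             break
--         out = out[:cut_at].strip().rstrip(",").strip()
--     return out or title
-- ===== SOURCE B (Python) =====
-- def _strip_trailing_parenthetical(title: str) -> str:
--     """Remove trailing `(...)` from a title so S2 gets a clean query.
--
--     Forward single pass: a stack of indices of unmatched '('; the '(' that
--     the final ')' pops is the cut position.
--     """
--     out = title.strip()
--     while out.endswith(")"):
--         stack = []
--         last = None
--         for i, ch in enumerate(out):
--             if ch == "(":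
--                 stack.append(i)
--             elif ch == ")":
--                 last = stack.pop() if stack else None
--         cut_at = last
--         if cut_at is None or cut_at == 0:
--             break
--         out = out[:cut_at].strip().rstrip(",").strip()
--     return out or title
-- ===== Notes on version B (the rewrite author's own statement) =====
-- stated objective: idiomatic
-- what changed: A's per-iteration backward right-to-left depth-counter scan for the matching '(' is replaced by a forward single pass that maintains a stack of indices of unmatched '(' and takes the index the final ')' pops as the cut position.
import Mathlib
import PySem

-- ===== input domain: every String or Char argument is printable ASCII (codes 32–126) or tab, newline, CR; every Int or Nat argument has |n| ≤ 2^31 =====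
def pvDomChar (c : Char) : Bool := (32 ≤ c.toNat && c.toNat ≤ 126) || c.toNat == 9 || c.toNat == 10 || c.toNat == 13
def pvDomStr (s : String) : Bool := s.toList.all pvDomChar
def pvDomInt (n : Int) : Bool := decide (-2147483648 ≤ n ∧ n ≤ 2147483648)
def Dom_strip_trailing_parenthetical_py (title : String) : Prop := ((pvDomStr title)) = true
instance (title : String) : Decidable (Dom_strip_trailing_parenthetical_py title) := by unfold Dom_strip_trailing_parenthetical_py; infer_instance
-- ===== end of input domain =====

-- B replaces A's per-iteration backward depth-counting scan by a forward single
-- pass maintaining a stack of indices of unmatched '(' (idiomatic bracket matching);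
-- outer loop and cleanup are the task's fixed skeleton.

-- ===== PORT A =====

-- `out[:cut_at].strip().rstrip(",").strip()` — rstrip(",") ported by hand (exact:
-- drop trailing ',' characters), strip() via PySem.Chars.strip.
def pvRstripComma (cs : List Char) : List Char :=
  (cs.reverse.dropWhile (fun c => c == ',')).reverse

def pvClean (cs : List Char) : List Char :=
  PySem.Chars.strip (pvRstripComma (PySem.Chars.strip cs))

-- `for i in range(len(out)-1, -1, -1): …` — i+1 is the fuel, current index is i.
def pvCutA_go (s : List Char) : Nat → Int → Option Int
  | 0, _ => none
  | i + 1, depth =>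
    if s.getD i ' ' = ')' then pvCutA_go s i (depth + 1)
    else if s.getD i ' ' = '(' then
      (if depth - 1 = 0 then some (i : Int) else pvCutA_go s i (depth - 1))
    else pvCutA_go s i depth

def pvCutA (s : List Char) : Option Int := pvCutA_go s s.length 0

-- the `while out.endswith(")")` loop; out shrinks strictly each iteration, so
-- fuel = |out|+1 suffices.
def pvLoopA : Nat → List Char → List Char
  | 0, out => out
  | fuel + 1, out =>
    if PySem.Chars.endswith out [')'] then
      match pvCutA out with
      | none => out
      | some c =>
        if c = 0 then out
        else pvLoopA fuel (pvClean (PySem.List.slice out none (some c)))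
    else out

def strip_trailing_parenthetical_py (title : String) : String :=
  let out0 := PySem.Chars.strip title.toList
  let res := pvLoopA (out0.length + 1) out0
  if res.isEmpty then title else String.ofList res

-- ===== PORT B =====

-- one enumerate step: push index of '(', on ')' pop (or record None).
def pvStepB (st : List Int × Option Int) (p : Int × Char) : List Int × Option Int :=
  if p.2 = '(' then (p.1 :: st.1, st.2)
  else if p.2 = ')' then
    match st.1 with
    | [] => (st.1, none)
    | t :: rest => (rest, some t)
  else st

def pvCutB (s : List Char) : Option Int :=
  ((PySem.List.enumerate s 0).foldl pvStepB ([], none)).2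

def pvLoopB : Nat → List Char → List Char
  | 0, out => out
  | fuel + 1, out =>
    if PySem.Chars.endswith out [')'] then
      match pvCutB out with
      | none => out
      | some c =>
        if c = 0 then out
        else pvLoopB fuel (pvClean (PySem.List.slice out none (some c)))
    else out

def strip_trailing_parenthetical_py_alt (title : String) : String :=
  let out0 := PySem.Chars.strip title.toList
  let res := pvLoopB (out0.length + 1) out0
  if res.isEmpty then title else String.ofList res

-- ===== PRECONDITION & SPEC =====
def Spec_strip_trailing_parenthetical_py (title : String) (out : String) : Prop := out = strip_trailing_parenthetical_py_alt title
instance (title : String) (out : String) : Decidable (Spec_strip_trailing_parenthetical_py title out) := by unfold Spec_strip_trailing_parenthetical_py; infer_instance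

-- ===== CLAIM (what is proved, stated in full; the proofs are below) =====
def Claim_equal_strip_trailing_parenthetical_py : Prop := ∀ (title : String), Dom_strip_trailing_parenthetical_py title → Spec_strip_trailing_parenthetical_py title (strip_trailing_parenthetical_py title)

-- ===== LEMMAS AND PROOFS =====

-- the stack component of B's forward pass
def pvStackB (s : List Char) : List Int :=
  ((PySem.List.enumerate s 0).foldl pvStepB ([], none)).1

-- the stack of the fold does not depend on the `last` component of the state
theorem pvFoldB_append (t : List Char) (c : Char) :
    (PySem.List.enumerate (t ++ [c]) 0).foldl pvStepB ([], none)
      = pvStepB ((PySem.List.enumerate t 0).foldl pvStepB ([], none)) ((t.length : Int), c) := by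
  rw [PySem.List.enumerate_append]
  rw [List.foldl_append]
  simp [PySem.List.enumerate_cons, PySem.List.enumerate_nil]

-- scanning stops before the appended last element: prefix irrelevance
theorem pvCutA_go_append (t : List Char) (c : Char) :
    ∀ i ≤ t.length, ∀ d, pvCutA_go (t ++ [c]) i d = pvCutA_go t i d := by
  intro i
  induction i generalizing c with
  | zero => intro _ d; rfl
  | succ i ih =>
    intro hi d
    have hget : (t ++ [c]).getD i ' ' = t.getD i ' ' := by
      simp only [List.getD, List.getElem?_append_left (by omega : i < t.length)]
    simp only [pvCutA_go, hget]
    split_ifs <;> first | rfl | exact ih c (by omega) _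

-- KEY: backward scan with pending depth d ≥ 1 lands on the (d-1)-th entry of
-- the forward stack of unmatched '(' indices.
theorem pvMain (t : List Char) :
    ∀ d : Int, 1 ≤ d → pvCutA_go t t.length d = (pvStackB t)[(d - 1).toNat]? := by
  induction t using List.reverseRecOn with
  | nil =>
    intro d _
    simp [pvCutA_go, pvStackB, PySem.List.enumerate_nil]
  | append_singleton t c ih =>
    intro d hd
    have hlen : (t ++ [c]).length = t.length + 1 := by simp
    have hget : (t ++ [c]).getD t.length ' ' = c := by
      simp [List.getD]
    have hstack : pvStackB (t ++ [c]) = (pvStepB ((PySem.List.enumerate t 0).foldl pvStepB ([], none)) ((t.length : Int), c)).1 := by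
      simp [pvStackB, pvFoldB_append]
    rw [hlen]
    simp only [pvCutA_go, hget]
    by_cases hc1 : c = ')'
    · subst hc1
      rw [if_pos rfl]
      rw [pvCutA_go_append t _ t.length (le_refl _)]
      rw [ih (d + 1) (by omega)]
      rw [hstack]
      simp only [pvStepB, reduceIte]
      cases hst : ((PySem.List.enumerate t 0).foldl pvStepB ([], none)).1 with
      | nil => simp [pvStackB, hst]
      | cons a rest =>
        simp only [pvStackB, hst]
        have h1 : (d + 1 - 1).toNat = (d - 1).toNat + 1 := by omega
        rw [h1]
        simp
    · by_cases hc2 : c = '('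
      · subst hc2
        rw [if_neg (by simp), if_pos rfl]
        rw [hstack]
        simp only [pvStepB, reduceIte]
        by_cases hd1 : d - 1 = 0
        · rw [if_pos hd1]
          have : (d - 1).toNat = 0 := by omega
          simp [this]
        · rw [if_neg hd1]
          rw [pvCutA_go_append t _ t.length (le_refl _)]
          rw [ih (d - 1) (by omega)]
          have h1 : (d - 1).toNat = (d - 1 - 1).toNat + 1 := by omega
          simp only [pvStackB, h1]
          simp
      · rw [if_neg (by simpa using hc1), if_neg (by simpa using hc2)]
        rw [pvCutA_go_append t _ t.length (le_refl _)]
        rw [ih d hd]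
        rw [hstack]
        simp only [pvStepB]
        rw [if_neg (by simpa using hc2), if_neg (by simpa using hc1)]
        rfl

-- on a string ending in ')' the two cut computations agree
theorem pvCut_eq (out : List Char) (h : PySem.Chars.endswith out [')'] = true) :
    pvCutA out = pvCutB out := by
  obtain ⟨t, ht⟩ : [')'] <:+ out := (PySem.Chars.endswith_iff out [')']).1 h
  subst ht
  have hlen : (t ++ [')']).length = t.length + 1 := by simp
  have hget : (t ++ [')']).getD t.length ' ' = ')' := by
    simp [List.getD]
  have ha : pvCutA (t ++ [')']) = (pvStackB t)[(0 : Nat)]? := by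
    unfold pvCutA
    rw [hlen]
    simp only [pvCutA_go, hget]
    rw [pvCutA_go_append t _ t.length (le_refl _)]
    have := pvMain t 1 (le_refl _)
    simpa using this
  have hb : pvCutB (t ++ [')']) = (pvStackB t)[(0 : Nat)]? := by
    unfold pvCutB
    rw [pvFoldB_append]
    simp only [pvStepB, reduceIte]
    cases hst : ((PySem.List.enumerate t 0).foldl pvStepB ([], none)).1 with
    | nil => simp [pvStackB, hst]
    | cons a rest => simp [pvStackB, hst]
  rw [ha, hb]

theorem pvLoop_eq : ∀ fuel out, pvLoopA fuel out = pvLoopB fuel out := by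
  intro fuel
  induction fuel with
  | zero => intro out; rfl
  | succ fuel ih =>
    intro out
    simp only [pvLoopA, pvLoopB]
    by_cases h : PySem.Chars.endswith out [')'] = true
    · rw [if_pos h, if_pos h, pvCut_eq out h]
      cases pvCutB out with
      | none => rfl
      | some c =>
        by_cases hc : c = 0
        · simp [hc]
        · simp only [if_neg hc]; exact ih _
    · rw [if_neg h, if_neg h]

-- ===== VERDICT (by name: the statement is the Claim_ definition above) =====
theorem strip_trailing_parenthetical_py_spec : Claim_equal_strip_trailing_parenthetical_py := by
  intro title _
  unfold Spec_strip_trailing_parenthetical_py strip_trailing_parenthetical_py strip_trailing_parenthetical_py_alt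
  simp only [pvLoop_eq]
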